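-- pv_equiv track=rewrite | github.com/ylt/wow-ports | scripts/generate-tests.py | _is_sequential_int_keys
-- ===== SOURCE A (Python) =====
-- def _is_sequential_int_keys(val: dict) -> bool:
--     """Check if dict has sequential 1-based integer keys."""
--     if not isinstance(val, dict):
--         return False
--     try:
--         keys = sorted(int(k) for k in val.keys())
--     except (ValueError, TypeError):
--         return False
--     return len(keys) > 0 and keys == list(range(1, len(keys) + 1))
-- ===== SOURCE B (Python) =====
-- def _is_sequential_int_keys(val: dict) -> bool:
--     """Check if dict has sequential 1-based integer keys."""
--     if not isinstance(val, dict):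
--         return False
--     try:
--         ints = [int(k) for k in val.keys()]
--     except (ValueError, TypeError):
--         return False
--     n = len(ints)
--     s = set(ints)
--     return n > 0 and len(s) == n and min(s) == 1 and max(s) == n
-- ===== Notes on version B (the rewrite author's own statement) =====
-- stated objective: alternative
-- what changed: Replaces sort-then-compare-to-range(1,n+1) with a hash-set pass: distinctness (len(set)==n) plus min==1 and max==n characterize the same predicate without sorting; int() parsing dominates runtime, so no measured speedup.
import Mathlib
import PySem

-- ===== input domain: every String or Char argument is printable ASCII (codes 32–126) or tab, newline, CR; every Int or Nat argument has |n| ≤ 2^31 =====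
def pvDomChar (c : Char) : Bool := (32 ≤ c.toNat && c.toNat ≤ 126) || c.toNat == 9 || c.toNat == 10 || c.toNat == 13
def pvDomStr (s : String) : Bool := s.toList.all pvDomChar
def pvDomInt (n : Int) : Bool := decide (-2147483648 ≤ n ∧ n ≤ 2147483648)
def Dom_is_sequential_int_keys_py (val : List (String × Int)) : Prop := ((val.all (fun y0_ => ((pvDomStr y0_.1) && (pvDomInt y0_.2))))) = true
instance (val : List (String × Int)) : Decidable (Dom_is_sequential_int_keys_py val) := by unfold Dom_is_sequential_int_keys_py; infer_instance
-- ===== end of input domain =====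

-- B replaces A's sort-then-compare-to-range with a single set pass (distinct count + min + max); same value everywhere.

-- ===== PORT A =====
-- 'int(k) for k in val.keys()' inside try/except: none = some key raised ValueError
def pvParseKeys : List String → Option (List Int)
  | [] => some []
  | k :: rest =>
    match PySem.Int.ofStr? k with
    | none => none
    | some i =>
      match pvParseKeys rest with
      | none => none
      | some t => some (i :: t)

def is_sequential_int_keys_py (val : List (String × Int)) : Bool :=
  match pvParseKeys (val.map Prod.fst) with
  | none => false
  | some ints =>
    let keys := PySem.List.sorted ints (fun x => x) false
    decide (keys.length > 0) &&
      decide (keys = PySem.List.pyRange 1 ((keys.length : Int) + 1) 1)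

-- ===== PORT B =====
def is_sequential_int_keys_py_alt (val : List (String × Int)) : Bool :=
  match pvParseKeys (val.map Prod.fst) with
  | none => false
  | some ints =>
    let n := ints.length
    let s := PySem.Set.ofList ints
    decide (n > 0) && decide (s.length = n) &&
      (PySem.List.min? s (fun x => x) == some 1) &&
      (PySem.List.max? s (fun x => x) == some (n : Int))

-- ===== PRECONDITION & SPEC =====
def Spec_is_sequential_int_keys_py (val : List (String × Int)) (out : Bool) : Prop := out = is_sequential_int_keys_py_alt val
instance (val : List (String × Int)) (out : Bool) : Decidable (Spec_is_sequential_int_keys_py val out) := by unfold Spec_is_sequential_int_keys_py; infer_instance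

-- ===== CLAIM (what is proved, stated in full; the proofs are below) =====
def Claim_equal_is_sequential_int_keys_py : Prop := ∀ (val : List (String × Int)), Dom_is_sequential_int_keys_py val → Spec_is_sequential_int_keys_py val (is_sequential_int_keys_py val)

-- ===== LEMMAS AND PROOFS =====

-- a list whose ordered dedup has full length has no duplicates
theorem pv_nodup_of_ofList_length (xs : List Int) (h : (PySem.Set.ofList xs).length = xs.length) : xs.Nodup := by
  have hfs : (PySem.Set.ofList xs).toFinset = xs.toFinset := by
    ext x; simp [List.mem_toFinset, PySem.Set.mem_ofList]
  have hc : xs.toFinset.card = xs.length := by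
    rw [← hfs, List.toFinset_card_of_nodup (PySem.Set.nodup_ofList xs), h]
  rw [List.card_toFinset] at hc
  exact List.dedup_eq_self.mp (List.Sublist.eq_of_length (List.dedup_sublist xs) hc)

-- the heart: on the parsed int keys, A's test and B's test compute the same Bool
theorem pv_core (ints : List Int) :
    (decide ((PySem.List.sorted ints (fun x => x) false).length > 0) &&
      decide (PySem.List.sorted ints (fun x => x) false =
        PySem.List.pyRange 1 (((PySem.List.sorted ints (fun x => x) false).length : Int) + 1) 1)) =
    (decide (ints.length > 0) && decide ((PySem.Set.ofList ints).length = ints.length) &&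
      (PySem.List.min? (PySem.Set.ofList ints) (fun x => x) == some 1) &&
      (PySem.List.max? (PySem.Set.ofList ints) (fun x => x) == some (ints.length : Int))) := by
  have hlen : (PySem.List.sorted ints (fun x => x) false).length = ints.length :=
    PySem.List.length_sorted ints (fun x => x) false
  rw [Bool.eq_iff_iff]
  simp only [Bool.and_eq_true, decide_eq_true_eq, beq_iff_eq, hlen]
  set n := ints.length with hn
  set R := PySem.List.pyRange 1 ((n : Int) + 1) 1 with hR
  have hRnd : R.Nodup := PySem.List.nodup_pyRange_one 1 ((n : Int) + 1)
  have hRmem : ∀ x : Int, x ∈ R ↔ 1 ≤ x ∧ x < (n : Int) + 1 := fun x =>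
    PySem.List.mem_pyRange_one
  constructor
  · rintro ⟨hpos, hsort⟩
    have hperm : R.Perm ints := hsort ▸ PySem.List.sorted_perm ints (fun x => x) false
    have hnd : ints.Nodup := hperm.nodup_iff.mp hRnd
    have hself : PySem.Set.ofList ints = ints := PySem.Set.ofList_eq_self_of_nodup ints hnd
    have hmem : ∀ x : Int, x ∈ ints ↔ 1 ≤ x ∧ x < (n : Int) + 1 := fun x =>
      (hperm.mem_iff).symm.trans (hRmem x)
    have h1 : (1 : Int) ∈ ints := (hmem 1).mpr ⟨le_refl _, by omega⟩
    have hnmem : (n : Int) ∈ ints := (hmem n).mpr ⟨by omega, by omega⟩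
    refine ⟨⟨⟨hpos, by rw [hself]⟩, ?_⟩, ?_⟩
    · rw [hself]
      cases hmin : PySem.List.min? ints (fun x => x) with
      | none =>
        have he := (PySem.List.min?_eq_none_iff ints (fun x => x)).mp hmin
        rw [he] at h1; simp at h1
      | some m =>
        have hm1 : m ≤ 1 := PySem.List.min?_isMin hmin 1 h1
        have h1m : 1 ≤ m := ((hmem m).mp (PySem.List.min?_mem hmin)).1
        have : m = 1 := le_antisymm hm1 h1m
        rw [this]
    · rw [hself]
      cases hmax : PySem.List.max? ints (fun x => x) with
      | none =>
        have he := (PySem.List.max?_eq_none_iff ints (fun x => x)).mp hmax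
        rw [he] at h1; simp at h1
      | some m =>
        have hm1 : (n : Int) ≤ m := PySem.List.max?_isMax hmax (n : Int) hnmem
        have h1m : m ≤ (n : Int) := by
          have := ((hmem m).mp (PySem.List.max?_mem hmax)).2; omega
        have : m = (n : Int) := le_antisymm h1m hm1
        rw [this]
  · rintro ⟨⟨⟨hpos, hslen⟩, hmin⟩, hmax⟩
    have hnd : ints.Nodup := pv_nodup_of_ofList_length ints hslen
    have hself : PySem.Set.ofList ints = ints := PySem.Set.ofList_eq_self_of_nodup ints hnd
    rw [hself] at hmin hmax
    have h1mem : (1 : Int) ∈ ints := PySem.List.min?_mem hmin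
    have hlo : ∀ y ∈ ints, (1 : Int) ≤ y := fun y hy => PySem.List.min?_isMin hmin y hy
    have hhi : ∀ y ∈ ints, y ≤ (n : Int) := fun y hy => PySem.List.max?_isMax hmax y hy
    have hsub : ints.toFinset ⊆ Finset.Icc (1 : Int) (n : Int) := by
      intro x hx
      rw [List.mem_toFinset] at hx
      exact Finset.mem_Icc.mpr ⟨hlo x hx, hhi x hx⟩
    have hcard : (Finset.Icc (1 : Int) (n : Int)).card = n := by
      rw [Int.card_Icc]; omega
    have hEq : ints.toFinset = Finset.Icc (1 : Int) (n : Int) :=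
      Finset.eq_of_subset_of_card_le hsub (by
        rw [hcard, List.toFinset_card_of_nodup hnd])
    have hRfs : R.toFinset = Finset.Icc (1 : Int) (n : Int) := by
      ext x
      rw [List.mem_toFinset, hRmem x, Finset.mem_Icc]
      omega
    have hperm : R.Perm ints :=
      (List.perm_of_nodup_nodup_toFinset_eq hnd hRnd (hEq.trans hRfs.symm)).symm
    refine ⟨hpos, ?_⟩
    exact PySem.List.sorted_eq_of_perm_of_pairwise_lt ints R (fun x => x) hperm
      (PySem.List.pairwise_lt_pyRange_one 1 ((n : Int) + 1))

-- ===== VERDICT (by name: the statement is the Claim_ definition above) =====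
theorem is_sequential_int_keys_py_spec : Claim_equal_is_sequential_int_keys_py := by
  intro val _
  unfold Spec_is_sequential_int_keys_py is_sequential_int_keys_py is_sequential_int_keys_py_alt
  cases pvParseKeys (val.map Prod.fst) with
  | none => rfl
  | some ints => exact pv_core ints
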